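-- pv_equiv track=rewrite | github.com/ClaysHere/computational-thinking | M06/pak-ganesh.py | cari_jenis_hewan
-- ===== SOURCE A (Python) =====
-- def cari_jenis_hewan(x, y, n, urutan):
--     if n == 1:
--         return x
--
--     total = []
--     for i in range(n):
--         total.append(x[i])
--         if i > 0:
--             total[i] += total[i-1]
--
--     for i in range(n):
--         if urutan <= total[i]:
--             if i == 0:
--                 return y[i]
--             return y[i-1] if urutan <= total[i-1] else y[i]
--
--     return -1
-- ===== SOURCE B (Python) =====
-- def cari_jenis_hewan(x, y, n, urutan):
--     acc = 0
--     for i in range(n):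
--         acc += x[i]
--         if urutan <= acc:
--             return y[i]
--     return -1
-- ===== Notes on version B (the rewrite author's own statement) =====
-- stated objective: simpler
-- what changed: Replaces A's two passes (build a prefix-sum array, then rescan it with an always-false ternary on the previous entry) by one pass with a scalar running total that returns y[i] at the first index whose cumulative sum reaches urutan; no list is materialized and the n==1 special case (A returns the list x, not an int) is dropped.
-- outside the precondition, e.g. on cari_jenis_hewan([5], [7], 1, 3): A returns [5], B returns 7; on cari_jenis_hewan([1, 2], [], 2, 100): A returns -1, B returns -1
import Mathlib
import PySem

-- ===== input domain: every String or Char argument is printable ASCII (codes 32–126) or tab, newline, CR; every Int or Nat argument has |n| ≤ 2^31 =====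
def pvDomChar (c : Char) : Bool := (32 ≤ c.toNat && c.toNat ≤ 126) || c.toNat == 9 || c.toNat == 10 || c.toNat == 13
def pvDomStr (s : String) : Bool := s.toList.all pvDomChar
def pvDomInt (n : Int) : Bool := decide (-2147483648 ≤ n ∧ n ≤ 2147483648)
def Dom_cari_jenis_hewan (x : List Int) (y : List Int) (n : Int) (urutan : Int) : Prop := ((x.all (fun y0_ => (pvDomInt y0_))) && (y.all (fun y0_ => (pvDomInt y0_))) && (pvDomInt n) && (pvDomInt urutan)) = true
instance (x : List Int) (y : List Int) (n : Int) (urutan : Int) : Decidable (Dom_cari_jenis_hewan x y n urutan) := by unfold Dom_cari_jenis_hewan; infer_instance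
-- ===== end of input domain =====

-- B replaces A's two passes (prefix-sum list build, then a rescan with a ternary on the
-- previous entry) by a single pass with a scalar running total; same return value on Pre_.

-- ===== PORT A =====
-- first loop: total.append(x[i]); if i > 0: total[i] += total[i-1]
-- (total.set i.toNat is exact here: the loop writes at index i = len(total)-1 ≥ 0)
def pvA_build (x : List Int) : List Int → List Int → List Int
  | total, [] => total
  | total, i :: rest =>
      let t1 := total ++ [PySem.List.pyGetD x i 0]
      let t2 := if 0 < i then t1.set i.toNat (PySem.List.pyGetD t1 i 0 + PySem.List.pyGetD t1 (i - 1) 0) else t1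
      pvA_build x t2 rest

-- second loop: first i with urutan <= total[i]
def pvA_scan (total : List Int) (y : List Int) (urutan : Int) : List Int → Int
  | [] => -1
  | i :: rest =>
      if urutan ≤ PySem.List.pyGetD total i 0 then
        if i = 0 then PySem.List.pyGetD y i 0
        else if urutan ≤ PySem.List.pyGetD total (i - 1) 0 then PySem.List.pyGetD y (i - 1) 0
        else PySem.List.pyGetD y i 0
      else pvA_scan total y urutan rest

def cari_jenis_hewan (x : List Int) (y : List Int) (n : Int) (urutan : Int) : Int :=
  if n = 1 then 0  -- Python A returns the LIST x here (not an int); excluded by Pre_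
  else pvA_scan (pvA_build x [] (PySem.List.pyRange 0 n 1)) y urutan (PySem.List.pyRange 0 n 1)

-- ===== PORT B =====
def pvB_loop (x : List Int) (y : List Int) (urutan : Int) : Int → List Int → Int
  | _, [] => -1
  | acc, i :: rest =>
      let acc2 := acc + PySem.List.pyGetD x i 0
      if urutan ≤ acc2 then PySem.List.pyGetD y i 0 else pvB_loop x y urutan acc2 rest

def cari_jenis_hewan_alt (x : List Int) (y : List Int) (n : Int) (urutan : Int) : Int :=
  pvB_loop x y urutan 0 (PySem.List.pyRange 0 n 1)

-- ===== PRECONDITION & SPEC =====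
-- Pre_ excludes n == 1 (A returns the list x, not an int) and inputs where n exceeds
-- len(x) or len(y), on which A's indexing can raise IndexError; the len(y) bound also
-- drops some inputs where A happens to return -1 without touching y (cited in claim.json).
def Pre_cari_jenis_hewan (x : List Int) (y : List Int) (n : Int) (urutan : Int) : Prop :=
  n ≠ 1 ∧ n ≤ (x.length : Int) ∧ n ≤ (y.length : Int)
instance (x : List Int) (y : List Int) (n : Int) (urutan : Int) : Decidable (Pre_cari_jenis_hewan x y n urutan) := by unfold Pre_cari_jenis_hewan; infer_instance

def pvWitness_cari_jenis_hewan : List Int × List Int × Int × Int := ([2, 3, 4], [10, 20, 30], 3, 4)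

def Spec_cari_jenis_hewan (x : List Int) (y : List Int) (n : Int) (urutan : Int) (out : Int) : Prop := out = cari_jenis_hewan_alt x y n urutan
instance (x : List Int) (y : List Int) (n : Int) (urutan : Int) (out : Int) : Decidable (Spec_cari_jenis_hewan x y n urutan out) := by unfold Spec_cari_jenis_hewan; infer_instance

-- ===== CLAIM (what is proved, stated in full; the proofs are below) =====
def Claim_equal_cari_jenis_hewan : Prop := ∀ (x : List Int) (y : List Int) (n : Int) (urutan : Int), Dom_cari_jenis_hewan x y n urutan → Pre_cari_jenis_hewan x y n urutan → Spec_cari_jenis_hewan x y n urutan (cari_jenis_hewan x y n urutan)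

-- ===== LEMMAS AND PROOFS =====

-- prefix sums of l with running start s
def pvPS : List Int → Int → List Int
  | [], _ => []
  | a :: t, s => (s + a) :: pvPS t (s + a)

theorem pvPS_length (l : List Int) (s : Int) : (pvPS l s).length = l.length := by
  induction l generalizing s with
  | nil => rfl
  | cons a t ih => simp [pvPS, ih]

theorem pvPS_append_singleton (l : List Int) (a s : Int) :
    pvPS (l ++ [a]) s = pvPS l s ++ [s + l.sum + a] := by
  induction l generalizing s with
  | nil => simp [pvPS]
  | cons b t ih => simp [pvPS, ih]; ring

theorem pvPS_getD (l : List Int) (s : Int) (k : Nat) (hk : k < l.length) :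
    (pvPS l s).getD k 0 = s + (l.take (k + 1)).sum := by
  induction l generalizing s k with
  | nil => simp at hk
  | cons a t ih =>
    cases k with
    | zero => simp [pvPS]
    | succ k =>
      have hk' : k < t.length := by simpa using hk
      rw [pvPS, List.getD_cons_succ, ih (s + a) k hk', List.take_succ_cons, List.sum_cons]
      ring

theorem pv_take_succ_concat (l : List Int) (k : Nat) (hk : k < l.length) :
    l.take (k + 1) = l.take k ++ [l.getD k 0] := by
  rw [List.take_add_one, List.getElem?_eq_getElem hk]
  simp [List.getD, List.getElem?_eq_getElem hk]

theorem pv_sum_take_succ (l : List Int) (k : Nat) (hk : k < l.length) :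
    (l.take (k + 1)).sum = (l.take k).sum + l.getD k 0 := by
  rw [pv_take_succ_concat l k hk]; simp

theorem pvPS_take_succ (x : List Int) (k : Nat) (hk : k < x.length) :
    pvPS (x.take (k + 1)) 0 = pvPS (x.take k) 0 ++ [(x.take k).sum + x.getD k 0] := by
  rw [pv_take_succ_concat x k hk, pvPS_append_singleton]
  simp

theorem pv_set_append_last (T : List Int) (a v : Int) :
    (T ++ [a]).set T.length v = T ++ [v] := by
  induction T with
  | nil => rfl
  | cons b t ih => simp [ih]

theorem pv_getD_append_last (T : List Int) (a : Int) : (T ++ [a]).getD T.length 0 = a := by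
  simp [List.getD]

theorem pvA_build_eq (x : List Int) (n : Int) (hnx : n ≤ (x.length : Int)) :
    ∀ (m : Nat) (j : Int), 0 ≤ j → n = j + m →
      pvA_build x (pvPS (x.take j.toNat) 0) (PySem.List.pyRange j n 1) = pvPS (x.take n.toNat) 0 := by
  intro m
  induction m with
  | zero =>
    intro j hj hn
    rw [PySem.List.pyRange_one_eq_nil (by omega)]
    simp [pvA_build, hn]
  | succ m ih =>
    intro j hj hn
    obtain ⟨k, rfl⟩ : ∃ k : Nat, j = (k : Int) := ⟨j.toNat, by omega⟩
    have hjn : (k : Int) < n := by omega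
    have hjx : k < x.length := by omega
    rw [PySem.List.pyRange_one_cons hjn]
    simp only [pvA_build, Int.toNat_natCast, PySem.List.pyGetD_natCast]
    have hlenT : (pvPS (x.take k) 0).length = k := by
      rw [pvPS_length, List.length_take]; omega
    have hstep : (if 0 < (k : Int) then
          (pvPS (x.take k) 0 ++ [x.getD k 0]).set k
            ((pvPS (x.take k) 0 ++ [x.getD k 0]).getD k 0 +
             PySem.List.pyGetD (pvPS (x.take k) 0 ++ [x.getD k 0]) ((k : Int) - 1) 0)
        else pvPS (x.take k) 0 ++ [x.getD k 0]) = pvPS (x.take (k + 1)) 0 := by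
      by_cases hk0 : k = 0
      · subst hk0
        simp [pvPS_take_succ x 0 hjx, pvPS]
      · have h0k : 0 < (k : Int) := by omega
        rw [if_pos h0k]
        have h1 := pv_getD_append_last (pvPS (x.take k) 0) (x.getD k 0)
        rw [hlenT] at h1
        have h2 : PySem.List.pyGetD (pvPS (x.take k) 0 ++ [x.getD k 0]) ((k : Int) - 1) 0
            = (x.take k).sum := by
          rw [show ((k : Int) - 1) = ((k - 1 : Nat) : Int) by omega, PySem.List.pyGetD_natCast]
          rw [List.getD_append _ _ _ _ (by omega)]
          rw [pvPS_getD _ _ _ (by rw [List.length_take]; omega)]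
          have : k - 1 + 1 = k := by omega
          rw [this, List.take_take]
          simp
        rw [h1, h2]
        have hset := pv_set_append_last (pvPS (x.take k) 0) (x.getD k 0) (x.getD k 0 + (x.take k).sum)
        rw [hlenT] at hset
        rw [hset, pvPS_take_succ x k hjx, add_comm]
    rw [hstep]
    have := ih ((k : Int) + 1) (by omega) (by omega)
    have hcast : (((k : Int) + 1)).toNat = k + 1 := by omega
    rw [hcast] at this
    exact this

theorem pv_loop_eq (x y : List Int) (urutan n : Int) (hnx : n ≤ (x.length : Int)) :
    ∀ (m : Nat) (j acc : Int), 0 ≤ j → n = j + m →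
      acc = (x.take j.toNat).sum →
      (j = 0 ∨ ¬ urutan ≤ PySem.List.pyGetD (pvPS (x.take n.toNat) 0) (j - 1) 0) →
      pvA_scan (pvPS (x.take n.toNat) 0) y urutan (PySem.List.pyRange j n 1)
        = pvB_loop x y urutan acc (PySem.List.pyRange j n 1) := by
  intro m
  induction m with
  | zero =>
    intro j acc hj hn hacc hprev
    rw [PySem.List.pyRange_one_eq_nil (by omega)]
    rfl
  | succ m ih =>
    intro j acc hj hn hacc hprev
    obtain ⟨k, rfl⟩ : ∃ k : Nat, j = (k : Int) := ⟨j.toNat, by omega⟩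
    have hjn : (k : Int) < n := by omega
    have hjx : k < x.length := by omega
    rw [PySem.List.pyRange_one_cons hjn]
    have hTj : PySem.List.pyGetD (pvPS (x.take n.toNat) 0) (k : Int) 0
        = acc + PySem.List.pyGetD x (k : Int) 0 := by
      rw [PySem.List.pyGetD_natCast, PySem.List.pyGetD_natCast]
      rw [pvPS_getD _ _ _ (by rw [List.length_take]; omega), List.take_take]
      have hmin : min (k + 1) n.toNat = k + 1 := by omega
      rw [hmin, pv_sum_take_succ x k hjx]
      rw [Int.toNat_natCast] at hacc
      rw [hacc]; ring
    simp only [pvA_scan, pvB_loop, hTj]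
    by_cases hc : urutan ≤ acc + PySem.List.pyGetD x (k : Int) 0
    · simp only [if_pos hc]
      by_cases hk0 : (k : Int) = 0
      · rw [if_pos hk0, hk0]
      · rw [if_neg hk0]
        rcases hprev with h | h
        · exact absurd h hk0
        · rw [if_neg h]
    · simp only [if_neg hc]
      refine ih ((k : Int) + 1) (acc + PySem.List.pyGetD x (k : Int) 0) (by omega) (by omega) ?_ ?_
      · have hcast : (((k : Int) + 1)).toNat = k + 1 := by omega
        rw [hcast, pv_sum_take_succ x k hjx]
        rw [Int.toNat_natCast] at hacc
        rw [hacc, PySem.List.pyGetD_natCast]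
      · right
        have : (k : Int) + 1 - 1 = (k : Int) := by ring
        rw [this, hTj]
        exact hc

-- ===== VERDICT (by name: the statement is the Claim_ definition above) =====
theorem cari_jenis_hewan_spec : Claim_equal_cari_jenis_hewan := by
  intro x y n urutan _ hpre
  obtain ⟨hn1, hnx, _⟩ := hpre
  unfold Spec_cari_jenis_hewan cari_jenis_hewan cari_jenis_hewan_alt
  rw [if_neg hn1]
  by_cases hn0 : n ≤ 0
  · rw [PySem.List.pyRange_one_eq_nil hn0]
    rfl
  · have hb := pvA_build_eq x n hnx n.toNat 0 le_rfl (by omega)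
    simp only [Int.toNat_zero, List.take_zero, pvPS] at hb
    rw [hb]
    exact pv_loop_eq x y urutan n hnx n.toNat 0 0 le_rfl (by omega) (by simp) (Or.inl rfl)
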